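-- pv_equiv track=rewrite | github.com/Luki248/99_problems | p09.py | p09
-- ===== SOURCE A (Python) =====
-- def p09(list):
--     if list == []:
--         return None
--     else:
--         new_list = []
--         temp_list = []
--         old_element = list[0]
--         for i in range(len(list)):
--             if list[i] == old_element:
--                 temp_list.append(list[i])
--             else:
--                 new_list.append(temp_list.copy())
--                 temp_list = [list[i]]
--                 old_element = list[i]
--         new_list.append(temp_list.copy())
--         return new_list
-- ===== SOURCE B (Python) =====
-- def p09(list):
--     # run-scanning two-pointer version: find the end of each run, slice it out
--     if not list:
--         return None
--     res = []
--     i = 0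
--     n = len(list)
--     while i < n:
--         j = i + 1
--         while j < n and list[j] == list[i]:
--             j += 1
--         res.append(list[i:j])
--         i = j
--     return res
-- ===== Notes on version B (the rewrite author's own statement) =====
-- stated objective: alternative
-- what changed: Replaced A's old_element/temp_list accumulator state machine with a two-pointer run scanner that finds each run's end index and slices the run out directly.
import Mathlib
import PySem

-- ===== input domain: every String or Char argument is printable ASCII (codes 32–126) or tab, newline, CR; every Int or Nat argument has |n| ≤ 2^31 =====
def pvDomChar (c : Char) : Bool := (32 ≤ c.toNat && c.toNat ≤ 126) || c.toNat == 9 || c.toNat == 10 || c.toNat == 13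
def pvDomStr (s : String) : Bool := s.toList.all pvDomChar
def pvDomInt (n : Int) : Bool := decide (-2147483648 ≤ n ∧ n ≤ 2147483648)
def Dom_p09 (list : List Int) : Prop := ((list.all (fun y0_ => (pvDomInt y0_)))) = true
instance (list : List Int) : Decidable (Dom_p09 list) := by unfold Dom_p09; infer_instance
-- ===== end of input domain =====

-- ===== PORT A =====
-- B replaces A's accumulator state machine with a run scanner (alternative decomposition; same cost).
def p09 (list : List Int) : Option (List (List Int)) :=
  if list = [] then none
  else
    let old := PySem.List.pyGetD list 0 0
    let st := (PySem.List.pyRange 0 (list.length : Int) 1).foldl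
      (fun (st : List (List Int) × List Int × Int) i =>
        let x := PySem.List.pyGetD list i 0
        if x = st.2.2 then (st.1, st.2.1 ++ [x], st.2.2)
        else (st.1 ++ [st.2.1], [x], x))
      ([], [], old)
    some (st.1 ++ [st.2.1])

-- ===== PORT B =====
-- inner while 'j += 1 while list[j] == list[i]' = takeWhile/dropWhile on the suffix; each run is sliced out, then recurse on the rest
def p09Runs : List Int → List (List Int)
  | [] => []
  | x :: xs => (x :: xs.takeWhile (· == x)) :: p09Runs (xs.dropWhile (· == x))
termination_by l => l.length
decreasing_by
  simp only [List.length_cons]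
  exact Nat.lt_succ_of_le (List.length_dropWhile_le _ _)

def p09_alt (list : List Int) : Option (List (List Int)) :=
  if list = [] then none else some (p09Runs list)

-- ===== PRECONDITION & SPEC =====
def Spec_p09 (list : List Int) (out : Option (List (List Int))) : Prop := out = p09_alt list
instance (list : List Int) (out : Option (List (List Int))) : Decidable (Spec_p09 list out) := by unfold Spec_p09; infer_instance

-- ===== CLAIM (what is proved, stated in full; the proofs are below) =====
def Claim_equal_p09 : Prop := ∀ (list : List Int), Dom_p09 list → Spec_p09 list (p09 list)

-- ===== LEMMAS AND PROOFS =====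

-- A's loop step, named for the lemmas
def p09Step (st : List (List Int) × List Int × Int) (x : Int) : List (List Int) × List Int × Int :=
  if x = st.2.2 then (st.1, st.2.1 ++ [x], st.2.2)
  else (st.1 ++ [st.2.1], [x], x)

-- functional view of what A's fold produces from an arbitrary state
def p09Cont (temp : List Int) (old : Int) : List Int → List (List Int)
  | [] => [temp]
  | x :: xs => if x = old then p09Cont (temp ++ [x]) old xs else temp :: p09Cont [x] x xs

lemma p09_foldl_cont (l : List Int) : ∀ (new : List (List Int)) (temp : List Int) (old : Int),
    (l.foldl p09Step (new, temp, old)).1 ++ [(l.foldl p09Step (new, temp, old)).2.1]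
      = new ++ p09Cont temp old l := by
  induction l with
  | nil => intro new temp old; simp [p09Cont]
  | cons x xs ih =>
    intro new temp old
    simp only [List.foldl_cons, p09Step, p09Cont]
    by_cases h : x = old
    · simp [h, ih]
    · simp [h, ih]

lemma p09_cont_runs (xs : List Int) : ∀ (run : List Int) (x : Int),
    p09Cont run x xs = (run ++ xs.takeWhile (· == x)) :: p09Runs (xs.dropWhile (· == x)) := by
  induction xs with
  | nil => intro run x; simp [p09Cont, p09Runs]
  | cons y ys ih =>
    intro run x
    by_cases h : y = x
    · simp only [p09Cont, h, List.takeWhile_cons, List.dropWhile_cons, BEq.rfl, ih]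
      simp
    · have hb : (y == x) = false := by simp [h]
      simp only [p09Cont, if_neg h, List.takeWhile_cons, List.dropWhile_cons, hb,
        ih ([y]) y]
      simp [p09Runs]

-- ===== VERDICT (by name: the statement is the Claim_ definition above) =====
theorem p09_spec : Claim_equal_p09 := by
  intro list _
  unfold Spec_p09 p09 p09_alt
  rcases list with _ | ⟨x, xs⟩
  · simp
  · simp only [reduceCtorEq]
    rw [PySem.List.foldl_pyRange_zero_pyGetD' (x :: xs) 0
      (fun (st : List (List Int) × List Int × Int) x =>
        if x = st.2.2 then (st.1, st.2.1 ++ [x], st.2.2)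
        else (st.1 ++ [st.2.1], [x], x))]
    have h0 : PySem.List.pyGetD (x :: xs) 0 0 = x := PySem.List.pyGetD_zero_cons x xs 0
    show some ((List.foldl p09Step _ _).1 ++ [(List.foldl p09Step _ _).2.1]) = _
    rw [h0]
    simp only [List.foldl_cons]
    have hs : p09Step ([], [], x) x = ([], [x], x) := by simp [p09Step]
    rw [hs, p09_foldl_cont, p09_cont_runs]
    have hr : p09Runs (x :: xs)
        = (x :: xs.takeWhile (· == x)) :: p09Runs (xs.dropWhile (· == x)) := by
      rw [p09Runs.eq_def]
    rw [hr]
    simp
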